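-- pv_equiv track=rewrite | github.com/TexasThug/Python_works | python_exercises/basics/functions/function_training_exercice#3.py | last_repeated_char
-- ===== SOURCE A (Python) =====
-- def last_repeated_char(text):
--     """
--     Retourne la DERNIÈRE lettre qui apparaît au moins 2 fois.
--     Sinon → None.
--     """
--     seen = set()
--     last = None
--
--     for c in text:
--         if c in seen:
--             last = c
--         else:
--             seen.add(c)
--
--     return last
-- ===== SOURCE B (Python) =====
-- def last_repeated_char(text):
--     """
--     Retourne la DERNIERE lettre qui apparait au moins 2 fois.
--     Sinon -> None.
--     Two-pass: build a frequency table, then scan in reverse for the first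
--     character whose total count is >= 2.
--     """
--     chars = list(text)
--     counts = {}
--     for c in chars:
--         counts[c] = counts.get(c, 0) + 1
--     for c in reversed(chars):
--         if counts[c] >= 2:
--             return c
--     return None
-- ===== Notes on version B (the rewrite author's own statement) =====
-- stated objective: alternative
-- what changed: Replaces the forward running-set with a last-duplicate accumulator by a two-pass strategy: build a full frequency table, then scan the characters in reverse and return the first one whose total count is at least 2.
import Mathlib
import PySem

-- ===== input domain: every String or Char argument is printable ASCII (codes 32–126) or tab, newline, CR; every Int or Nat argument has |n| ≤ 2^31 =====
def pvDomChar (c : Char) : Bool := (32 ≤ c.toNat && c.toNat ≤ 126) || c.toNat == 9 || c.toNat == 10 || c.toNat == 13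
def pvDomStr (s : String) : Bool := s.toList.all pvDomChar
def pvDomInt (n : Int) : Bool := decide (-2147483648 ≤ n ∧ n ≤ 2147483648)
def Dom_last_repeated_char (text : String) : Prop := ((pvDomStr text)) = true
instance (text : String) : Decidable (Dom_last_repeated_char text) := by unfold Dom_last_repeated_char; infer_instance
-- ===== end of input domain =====

-- B builds a frequency table then scans the characters in reverse for the first
-- with count >= 2, instead of A's forward running-set that tracks the last duplicate.


-- ===== PORT A =====
-- one loop step of A: 'if c in seen: last = c else: seen.add(c)'
def lrcStep (st : PySem.Set Char × Option Char) (c : Char) : PySem.Set Char × Option Char :=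
  if PySem.Set.contains st.1 c then (st.1, some c) else (PySem.Set.add st.1 c, st.2)

def last_repeated_char (text : String) : Option String :=
  let st := text.toList.foldl lrcStep (PySem.Set.empty, none)
  st.2.map (fun c => String.mk [c])

-- ===== PORT B =====
def last_repeated_char_alt (text : String) : Option String :=
  let chars := text.toList
  let counts := chars.foldl (fun (d : PySem.Dict Char Int) c => d.insert c (d.getD c 0 + 1)) PySem.Dict.empty
  (chars.reverse.find? (fun c => decide (2 ≤ counts.getD c 0))).map (fun c => String.mk [c])

-- ===== PRECONDITION & SPEC =====
def Spec_last_repeated_char (text : String) (out : Option String) : Prop := out = last_repeated_char_alt text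
instance (text : String) (out : Option String) : Decidable (Spec_last_repeated_char text out) := by unfold Spec_last_repeated_char; infer_instance

-- ===== CLAIM (what is proved, stated in full; the proofs are below) =====
def Claim_equal_last_repeated_char : Prop := ∀ (text : String), Dom_last_repeated_char text → Spec_last_repeated_char text (last_repeated_char text)

-- ===== LEMMAS AND PROOFS =====

theorem find?_congr_mem {α : Type} (l : List α) (p q : α → Bool)
    (h : ∀ a ∈ l, p a = q a) : l.find? p = l.find? q := by
  induction l with
  | nil => rfl
  | cons x xs ih =>
    simp only [List.find?]
    rw [h x (by simp)]
    cases q x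
    · exact ih (fun a ha => h a (by simp [ha]))
    · rfl

theorem lrc_fold_fst (l : List Char) (s : PySem.Set Char) (o : Option Char) :
    (l.foldl lrcStep (s, o)).1 = PySem.Set.update s l := by
  induction l generalizing s o with
  | nil => rfl
  | cons c cs ih =>
    simp only [List.foldl, lrcStep, PySem.Set.update]
    by_cases h : PySem.Set.contains s c = true
    · simp only [h, if_true]
      rw [ih]
      have : PySem.Set.add s c = s := PySem.Set.add_of_mem ((PySem.Set.contains_iff s c).mp h)
      simp [PySem.Set.update, this]
    · simp only [h]
      rw [ih]
      rfl

theorem lrc_fold_snd (l : List Char) (s : PySem.Set Char) (o : Option Char) :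
    (l.foldl lrcStep (s, o)).2
      = (l.reverse.find? (fun c => decide (c ∈ s) || decide ((2:Int) ≤ l.count c))).or o := by
  induction l using List.reverseRecOn generalizing s o with
  | nil => rfl
  | append_singleton xs c ih =>
    rw [List.foldl_append]
    have hfst : (xs.foldl lrcStep (s, o)).1 = PySem.Set.update s xs := lrc_fold_fst xs s o
    have hmem : PySem.Set.contains (xs.foldl lrcStep (s, o)).1 c = (decide (c ∈ s) || decide (c ∈ xs)) := by
      rw [hfst]
      simp [PySem.Set.mem_update]
    simp only [List.foldl, lrcStep, hmem]
    have hcnt : ((xs ++ [c]).count c : Int) = (xs.count c : Int) + 1 := by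
      simp [List.count_append]
    by_cases hc : c ∈ s ∨ c ∈ xs
    · have hb : (decide (c ∈ s) || decide (c ∈ xs)) = true := by
        simp [hc]
      rw [hb]
      simp only [if_true, List.reverse_append, List.reverse_singleton, List.singleton_append,
        List.find?]
      have hp : (decide (c ∈ s) || decide ((2:Int) ≤ (xs ++ [c]).count c)) = true := by
        rcases hc with h | h
        · simp [h]
        · have h1 : 1 ≤ xs.count c := List.one_le_count_iff.mpr h
          have h2 : (2:Int) ≤ ((xs ++ [c]).count c : Int) := by rw [hcnt]; omega
          simp only [decide_eq_true h2, Bool.or_true]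
      rw [hp]
      rfl
    · rw [not_or] at hc
      obtain ⟨hcs, hcx⟩ := hc
      have hb : (decide (c ∈ s) || decide (c ∈ xs)) = false := by
        simp [hcs, hcx]
      rw [hb]
      simp only [Bool.false_eq_true, if_false, List.reverse_append, List.reverse_singleton,
        List.singleton_append, List.find?]
      have hpc : (decide (c ∈ s) || decide ((2:Int) ≤ (xs ++ [c]).count c)) = false := by
        have h1 : xs.count c = 0 := List.count_eq_zero.mpr hcx
        norm_num [hcs, List.count_append, h1]
      rw [hpc, ih]
      congr 1
      apply find?_congr_mem
      intro a ha
      have hax : a ∈ xs := by simpa using ha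
      have hca : ¬ (c = a) := fun h => hcx (h ▸ hax)
      simp [List.count_append, hca]

theorem counts_getD (l : List Char) (c : Char) :
    (l.foldl (fun (d : PySem.Dict Char Int) c => d.insert c (d.getD c 0 + 1)) PySem.Dict.empty).getD c 0
      = (l.count c : Int) := by
  rw [PySem.Dict.foldl_insert_getD_add_one_eq_counter, PySem.Dict.getD_counter]

-- ===== VERDICT (by name: the statement is the Claim_ definition above) =====
theorem last_repeated_char_spec : Claim_equal_last_repeated_char := by
  intro text _
  unfold Spec_last_repeated_char last_repeated_char last_repeated_char_alt
  simp only []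
  rw [lrc_fold_snd]
  congr 1
  rw [Option.or_none]
  apply find?_congr_mem
  intro a _
  rw [counts_getD]
  simp [PySem.Set.empty]
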